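-- pv_equiv track=rewrite | github.com/vdorr/bloced | hparser.py | parse_decl
-- ===== SOURCE A (Python) =====
-- def identify_type(lst) :
-- 	return tuple(lst)
--
-- def parse_decl(tokens) :
-- #	print here(), tokens
-- 	arg_lst_start = tokens.index("(")
-- 	name = tokens[arg_lst_start-1]
-- 	ret_type = identify_type(tokens[0:arg_lst_start-1])
-- 	args_list = []
-- 	arg_type = []
-- 	prev = None
-- 	for tok in tokens[arg_lst_start+1:] :
-- 		if tok in ( ",", ")" ) :
-- 			t = identify_type(arg_type[:-1])
-- 			if len(t) :
-- 				args_list.append((t, prev))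
-- 			arg_type = []
-- 		else :
-- 			arg_type.append(tok)
-- 		prev = tok
-- 	return ret_type, name, args_list
-- ===== SOURCE B (Python) =====
-- def parse_decl(tokens):
--     arg_lst_start = tokens.index("(")
--     name = tokens[arg_lst_start - 1]
--     ret_type = tuple(tokens[:arg_lst_start - 1])
--     args_list = []
--     rest = tokens[arg_lst_start + 1:]
--     while any(t in (",", ")") for t in rest):
--         k = next(i for i, t in enumerate(rest) if t in (",", ")"))
--         g, rest = rest[:k], rest[k + 1:]
--         if len(g) >= 2:
--             args_list.append((tuple(g[:-1]), g[-1]))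
--     return ret_type, name, args_list
-- ===== Notes on version B (the rewrite author's own statement) =====
-- stated objective: alternative
-- what changed: A's single stateful token loop (accumulator + prev variable) is replaced by repeatedly locating the next ',' / ')' delimiter and chopping the completed group off the front of the remaining tokens, emitting (group[:-1], group[-1]) per chunk; no per-token state or prev tracking remains.
import Mathlib
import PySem

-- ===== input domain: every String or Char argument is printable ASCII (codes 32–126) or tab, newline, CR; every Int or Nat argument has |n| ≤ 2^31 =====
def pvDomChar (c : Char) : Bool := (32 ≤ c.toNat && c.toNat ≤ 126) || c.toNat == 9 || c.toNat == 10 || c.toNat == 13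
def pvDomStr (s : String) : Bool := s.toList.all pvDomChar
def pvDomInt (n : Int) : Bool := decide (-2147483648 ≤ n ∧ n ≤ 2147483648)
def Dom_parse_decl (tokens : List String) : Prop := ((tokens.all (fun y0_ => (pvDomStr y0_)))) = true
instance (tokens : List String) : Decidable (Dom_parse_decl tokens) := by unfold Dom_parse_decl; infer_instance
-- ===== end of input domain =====

-- B replaces A's stateful token loop (group accumulator + prev variable) by repeatedly chopping the
-- token list at the next ','/')' delimiter; same return value wherever A returns (objective: alternative).

-- ===== PORT A =====
-- step of A's 'for tok in tokens[arg_lst_start+1:]' loop; state = (args_list, arg_type, prev).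
-- prev is Option String (Python's None); it is read only when arg_type[:-1] is non-empty, where it is some _.
def parse_decl_step (s : List (List String × String) × List String × Option String) (tok : String) :
    List (List String × String) × List String × Option String :=
  if tok = "," ∨ tok = ")" then
    let t := s.2.1.dropLast                              -- identify_type(arg_type[:-1])
    let al := if t.length ≠ 0 then s.1 ++ [(t, s.2.2.getD "")] else s.1
    (al, [], some tok)
  else
    (s.1, s.2.1 ++ [tok], some tok)

def parse_decl (tokens : List String) : List String × String × (List (List String × String)) :=
  match PySem.List.index? tokens "(" with
  | none => ([], "", [])                                 -- Python raises ValueError here; excluded by Pre_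
  | some i =>
    let name := (PySem.List.pyGet? tokens ((i : Int) - 1)).getD ""
    let ret_type := PySem.List.slice tokens (some 0) (some ((i : Int) - 1))
    let st := (PySem.List.slice tokens (some ((i : Int) + 1)) none).foldl parse_decl_step ([], [], none)
    (ret_type, name, st.1)

-- ===== PORT B =====
-- the while loop of Source B: find the next ','/')' (none = any(...) false: stop), chop the group off the front
def parse_decl_chop : List String → List (List String × String)
  | [] => []
  | x :: xs =>
    match (x :: xs).findIdx? (fun t => t == "," || t == ")") with
    | none => []
    | some k =>
      let g := (x :: xs).take k
      (if 2 ≤ g.length then [(g.dropLast, (PySem.List.pyGet? g (-1)).getD "")] else [])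
        ++ parse_decl_chop ((x :: xs).drop (k + 1))
termination_by l => l.length
decreasing_by
  simp only [List.length_drop, List.length_cons]
  omega

def parse_decl_alt (tokens : List String) : List String × String × (List (List String × String)) :=
  match PySem.List.index? tokens "(" with
  | none => ([], "", [])                                 -- Python raises ValueError here; excluded by Pre_
  | some i =>
    let name := (PySem.List.pyGet? tokens ((i : Int) - 1)).getD ""
    let ret_type := PySem.List.slice tokens (some 0) (some ((i : Int) - 1))
    (ret_type, name, parse_decl_chop (PySem.List.slice tokens (some ((i : Int) + 1)) none))

-- ===== PRECONDITION & SPEC =====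
-- Pre_ excludes exactly the inputs without a "(" token, on which A (tokens.index) raises ValueError (B raises too).
def Pre_parse_decl (tokens : List String) : Prop := "(" ∈ tokens
instance (tokens : List String) : Decidable (Pre_parse_decl tokens) := by unfold Pre_parse_decl; infer_instance
def pvWitness_parse_decl : List String := ["int", "f", "(", "int", "x", ",", "char", "y", ")"]

def Spec_parse_decl (tokens : List String) (out : List String × String × (List (List String × String))) : Prop := out = parse_decl_alt tokens
instance (tokens : List String) (out : List String × String × (List (List String × String))) : Decidable (Spec_parse_decl tokens out) := by unfold Spec_parse_decl; infer_instance

-- ===== CLAIM (what is proved, stated in full; the proofs are below) =====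
def Claim_equal_parse_decl : Prop := ∀ (tokens : List String), Dom_parse_decl tokens → Pre_parse_decl tokens → Spec_parse_decl tokens (parse_decl tokens)

-- ===== LEMMAS AND PROOFS =====

-- front-recursive restatement of A's loop (proof helper)
def parse_decl_procA : List String → List String → List (List String × String)
  | _, [] => []
  | at_, tok :: ts =>
    if tok = "," ∨ tok = ")" then
      (if at_.dropLast.length ≠ 0 then [(at_.dropLast, (at_.getLast?).getD "")] else [])
        ++ parse_decl_procA [] ts
    else
      parse_decl_procA (at_ ++ [tok]) ts

-- A's foldl equals the front recursion, under the invariant that prev is arg_type's last element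
lemma parse_decl_foldl_eq_procA (rest : List String) :
    ∀ (al : List (List String × String)) (at_ : List String) (prev : Option String),
    (at_ ≠ [] → prev = at_.getLast?) →
    (rest.foldl parse_decl_step (al, at_, prev)).1 = al ++ parse_decl_procA at_ rest := by
  induction rest with
  | nil => intro al at_ prev _; simp [parse_decl_procA]
  | cons tok ts ih =>
    intro al at_ prev hinv
    by_cases hd : tok = "," ∨ tok = ")"
    · simp only [List.foldl_cons, parse_decl_step, if_pos hd, parse_decl_procA]
      by_cases ht : at_.dropLast.length ≠ 0
      · have hne : at_ ≠ [] := by intro h; subst h; simp at ht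
        rw [if_pos ht, if_pos ht, hinv hne, ih _ [] (some tok) (by simp)]
        simp [List.append_assoc]
      · rw [if_neg ht, if_neg ht, ih _ [] (some tok) (by simp)]
        simp
    · simp only [List.foldl_cons, parse_decl_step, if_neg hd, parse_decl_procA]
      rw [ih _ (at_ ++ [tok]) (some tok) (by simp)]

lemma parse_decl_findIdx_none (at_ : List String)
    (hat : ∀ x ∈ at_, ¬(x = "," ∨ x = ")")) :
    at_.findIdx? (fun t => t == "," || t == ")") = none := by
  refine List.findIdx?_eq_none_iff.mpr ?_
  intro x hx
  have hx' := hat x hx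
  simp only [Bool.or_eq_false_iff, beq_eq_false_iff_ne, ne_eq]
  tauto

lemma parse_decl_findIdx_append (at_ : List String) (tok : String) (ts : List String)
    (hat : ∀ x ∈ at_, ¬(x = "," ∨ x = ")")) (hd : tok = "," ∨ tok = ")") :
    (at_ ++ tok :: ts).findIdx? (fun t => t == "," || t == ")") = some at_.length := by
  induction at_ with
  | nil =>
    simp only [List.nil_append, List.findIdx?_cons]
    have hb : (tok == "," || tok == ")") = true := by
      simp only [Bool.or_eq_true, beq_iff_eq]; tauto
    simp [hb]
  | cons x xs ih =>
    have hx : ¬(x = "," ∨ x = ")") := hat x (by simp)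
    have hxb : (x == "," || x == ")") = false := by
      simp only [Bool.or_eq_false_iff, beq_eq_false_iff_ne, ne_eq]; tauto
    simp only [List.cons_append, List.findIdx?_cons, hxb, Bool.false_eq_true, if_false]
    rw [ih (fun y hy => hat y (by simp [hy]))]
    simp

lemma parse_decl_chop_none (rest : List String)
    (h : rest.findIdx? (fun t => t == "," || t == ")") = none) :
    parse_decl_chop rest = [] := by
  cases rest with
  | nil => rw [parse_decl_chop]
  | cons x xs => rw [parse_decl_chop, h]

lemma parse_decl_chop_some (rest : List String) (k : Nat)
    (h : rest.findIdx? (fun t => t == "," || t == ")") = some k) :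
    parse_decl_chop rest =
      (if 2 ≤ (rest.take k).length then
        [((rest.take k).dropLast, (PySem.List.pyGet? (rest.take k) (-1)).getD "")] else [])
      ++ parse_decl_chop (rest.drop (k + 1)) := by
  cases rest with
  | nil => simp at h
  | cons x xs => rw [parse_decl_chop, h]

-- the front recursion equals B's chopper, for a delimiter-free pending group
lemma parse_decl_procA_eq_chop (rest : List String) :
    ∀ (at_ : List String), (∀ x ∈ at_, ¬(x = "," ∨ x = ")")) →
    parse_decl_procA at_ rest = parse_decl_chop (at_ ++ rest) := by
  induction rest with
  | nil =>
    intro at_ hat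
    rw [List.append_nil, parse_decl_chop_none at_ (parse_decl_findIdx_none at_ hat)]
    rfl
  | cons tok ts ih =>
    intro at_ hat
    by_cases hd : tok = "," ∨ tok = ")"
    · rw [parse_decl_chop_some _ at_.length (parse_decl_findIdx_append at_ tok ts hat hd)]
      have htake : (at_ ++ tok :: ts).take at_.length = at_ := by simp
      have hdrop : (at_ ++ tok :: ts).drop (at_.length + 1) = ts := by
        rw [show at_ ++ tok :: ts = (at_ ++ [tok]) ++ ts by simp,
            show at_.length + 1 = (at_ ++ [tok]).length by simp]
        simp
      rw [htake, hdrop]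
      simp only [parse_decl_procA, if_pos hd]
      rw [ih [] (by simp)]
      simp only [List.nil_append]
      congr 1
      have hlen : at_.dropLast.length = at_.length - 1 := List.length_dropLast
      by_cases ht : at_.dropLast.length ≠ 0
      · have h2 : 2 ≤ at_.length := by
          simp only [ne_eq, hlen] at ht
          omega
        rw [if_pos ht, if_pos h2, PySem.List.pyGet?_neg_one]
      · have h2 : ¬ 2 ≤ at_.length := by
          simp only [ne_eq, not_not, hlen] at ht
          omega
        rw [if_neg ht, if_neg h2]
    · rw [show at_ ++ tok :: ts = (at_ ++ [tok]) ++ ts by simp]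
      simp only [parse_decl_procA, if_neg hd]
      refine ih (at_ ++ [tok]) ?_
      intro x hx
      rcases List.mem_append.mp hx with h | h
      · exact hat x h
      · simp at h; subst h; exact hd

-- ===== VERDICT (by name: the statement is the Claim_ definition above) =====
theorem parse_decl_spec : Claim_equal_parse_decl := by
  intro tokens _ _
  unfold Spec_parse_decl parse_decl parse_decl_alt
  cases hidx : PySem.List.index? tokens "(" with
  | none => rfl
  | some i =>
    simp only [Prod.mk.injEq]
    refine ⟨trivial, trivial, ?_⟩
    rw [parse_decl_foldl_eq_procA _ [] [] none (by simp)]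
    rw [parse_decl_procA_eq_chop _ [] (by simp)]
    simp
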